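-- pv_equiv track=rewrite | github.com/amritsharan/micro-project-IR | engine.py | safe_wrap_long_tokens
-- ===== SOURCE A (Python) =====
-- def safe_wrap_long_tokens(text, max_len=40):
--     """
--     Insert hard line breaks inside very long tokens.
--     Avoids zero-width spaces which FPDF can't handle.
--     """
--     if not text:
--         return ""
--     # sanitize: remove problematic control characters
--     text = text.replace("\t", " ").replace("\r", " ")
--     text = ''.join(ch for ch in text if ord(ch) >= 32 or ch == '\n')
--     words = text.split(" ")
--     wrapped = []
--     for w in words:
--         if len(w) <= max_len:
--             wrapped.append(w)
--         else:
--             # Hard break with space separator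
--             parts = [w[i:i+max_len] for i in range(0, len(w), max_len)]
--             wrapped.extend(parts)
--     return " ".join(wrapped)
-- ===== SOURCE B (Python) =====
-- def safe_wrap_long_tokens(text, max_len=40):
--     # Single pass over the sanitized text tracking the current run of
--     # non-space characters; insert a breaking space when the run hits max_len.
--     text = text.replace("\t", " ").replace("\r", " ")
--     text = ''.join(ch for ch in text if ord(ch) >= 32 or ch == '\n')
--     out = []
--     run = 0
--     for ch in text:
--         if ch == ' ':
--             out.append(ch)
--             run = 0
--         else:
--             if run == max_len:
--                 out.append(' ')
--                 run = 0
--             out.append(ch)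
--             run += 1
--     return ''.join(out)
-- ===== Notes on version B (the rewrite author's own statement) =====
-- stated objective: alternative
-- what changed: Replaces A's split-on-space / per-word chunk-list / join pipeline by a single pass over the sanitized text that copies characters while tracking the current run of non-space characters and inserts a breaking space when the run reaches max_len.
-- outside the precondition, e.g. on safe_wrap_long_tokens('abc', -1): A returns '', B returns 'abc'
import Mathlib
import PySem

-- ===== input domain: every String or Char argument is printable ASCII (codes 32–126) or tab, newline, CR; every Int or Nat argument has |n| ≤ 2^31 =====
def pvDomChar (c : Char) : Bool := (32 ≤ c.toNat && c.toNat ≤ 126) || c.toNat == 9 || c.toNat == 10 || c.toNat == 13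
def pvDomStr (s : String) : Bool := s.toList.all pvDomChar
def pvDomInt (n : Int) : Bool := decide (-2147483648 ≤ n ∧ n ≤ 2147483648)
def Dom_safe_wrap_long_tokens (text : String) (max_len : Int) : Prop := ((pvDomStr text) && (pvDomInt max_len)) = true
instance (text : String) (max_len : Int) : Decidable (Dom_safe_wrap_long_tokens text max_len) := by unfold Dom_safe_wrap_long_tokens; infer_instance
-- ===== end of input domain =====

-- B replaces A's split/chunk/join pipeline by a single character scan with a run counter (same cost, different decomposition).


-- ===== PORT A =====
-- sanitize: text.replace("\t"," ").replace("\r"," ") then keep ch with ord(ch) >= 32 or ch == '\n'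
-- (these two lines are textually identical in A and in B, so both ports share this helper)
def pvSanitize (text : String) : List Char :=
  let t1 := PySem.Chars.replace text.toList ['\t'] [' ']
  let t2 := PySem.Chars.replace t1 ['\r'] [' ']
  t2.filter (fun ch => decide (32 ≤ ch.toNat) || ch == '\n')

def safe_wrap_long_tokens (text : String) (max_len : Int) : String :=
  if text = "" then ""
  else
    let t := pvSanitize text
    let words := PySem.Chars.splitOn t [' ']
    let wrapped := words.foldl (fun acc w =>
      if (w.length : Int) ≤ max_len then acc ++ [w]
      else acc ++ (PySem.List.pyRange 0 (w.length : Int) max_len).map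
            (fun i => PySem.List.slice w (some i) (some (i + max_len)))) []
    String.mk (PySem.Chars.join [' '] wrapped)

-- ===== PORT B =====
def pvStep (max_len : Int) (st : List Char × Int) (ch : Char) : List Char × Int :=
  if ch == ' ' then (st.1 ++ [ch], 0)
  else if st.2 == max_len then ((st.1 ++ [' ']) ++ [ch], 0 + 1)
  else (st.1 ++ [ch], st.2 + 1)

def safe_wrap_long_tokens_alt (text : String) (max_len : Int) : String :=
  let t := pvSanitize text
  String.mk ((t.foldl (pvStep max_len) ([], 0)).1)

-- ===== PRECONDITION & SPEC =====
-- Pre_ restricts to the natural domain max_len ≥ 1: at max_len = 0 A raises ValueError (whenever a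
-- non-space token exists) and for negative max_len A silently drops every over-long token.
def Pre_safe_wrap_long_tokens (text : String) (max_len : Int) : Prop := 1 ≤ max_len
instance (text : String) (max_len : Int) : Decidable (Pre_safe_wrap_long_tokens text max_len) := by unfold Pre_safe_wrap_long_tokens; infer_instance
def pvWitness_safe_wrap_long_tokens : String × Int := ("ab cdef", 3)

def Spec_safe_wrap_long_tokens (text : String) (max_len : Int) (out : String) : Prop := out = safe_wrap_long_tokens_alt text max_len
instance (text : String) (max_len : Int) (out : String) : Decidable (Spec_safe_wrap_long_tokens text max_len out) := by unfold Spec_safe_wrap_long_tokens; infer_instance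

-- ===== CLAIM =====
def Claim_equal_safe_wrap_long_tokens : Prop := ∀ (text : String) (max_len : Int), Dom_safe_wrap_long_tokens text max_len → Pre_safe_wrap_long_tokens text max_len → Spec_safe_wrap_long_tokens text max_len (safe_wrap_long_tokens text max_len)

-- ===== LEMMAS AND PROOFS =====

-- split(" ") as a structural recursion; pre is the pending partial word
def pvSplit : List Char → List Char → List (List Char)
  | pre, [] => [pre]
  | pre, c :: rest => if c = ' ' then pre :: pvSplit [] rest else pvSplit (pre ++ [c]) rest

-- hard-wrapped form of one token, and B's run counter after scanning it from 0
def pvHW (m : Int) (p : List Char) : List Char :=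
  if (p.length : Int) ≤ m ∨ m < 1 then p
  else p.take m.toNat ++ ' ' :: pvHW m (p.drop m.toNat)
termination_by p.length
decreasing_by
  rename_i h
  push_neg at h
  simp only [List.length_drop]
  omega

def pvRN (m : Int) (p : List Char) : Nat :=
  if (p.length : Int) ≤ m ∨ m < 1 then p.length
  else pvRN m (p.drop m.toNat)
termination_by p.length
decreasing_by
  rename_i h
  push_neg at h
  simp only [List.length_drop]
  omega

-- the per-token action of A's loop
def pvG (m : Int) (w : List Char) : List (List Char) :=
  if (w.length : Int) ≤ m then [w]
  else (PySem.List.pyRange 0 (w.length : Int) m).map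
        (fun i => PySem.List.slice w (some i) (some (i + m)))

theorem pvHW_le (m : Int) (p : List Char) (h : (p.length : Int) ≤ m ∨ m < 1) : pvHW m p = p := by
  rw [pvHW]; exact if_pos h

theorem pvHW_gt (m : Int) (p : List Char) (h : ¬((p.length : Int) ≤ m ∨ m < 1)) :
    pvHW m p = p.take m.toNat ++ ' ' :: pvHW m (p.drop m.toNat) := by
  rw [pvHW]; exact if_neg h

theorem pvRN_le (m : Int) (p : List Char) (h : (p.length : Int) ≤ m ∨ m < 1) : pvRN m p = p.length := by
  rw [pvRN]; exact if_pos h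

theorem pvRN_gt (m : Int) (p : List Char) (h : ¬((p.length : Int) ≤ m ∨ m < 1)) :
    pvRN m p = pvRN m (p.drop m.toNat) := by
  rw [pvRN]; exact if_neg h

theorem pvSplit_go (s : List Char) : ∀ (fuel : Nat) (cur : List Char) (acc : List (List Char)),
    s.length < fuel →
    PySem.Chars.splitOn.go [' '] fuel s cur acc = acc.reverse ++ pvSplit cur.reverse s := by
  induction s with
  | nil =>
    intro fuel cur acc h
    match fuel with
    | f + 1 => simp [PySem.Chars.splitOn.go, pvSplit]
  | cons c rest ih =>
    intro fuel cur acc h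
    simp only [List.length_cons] at h
    match fuel with
    | f + 1 =>
      rw [PySem.Chars.splitOn.go]
      by_cases hc : c = ' '
      · subst hc
        have hp : [' '].isPrefixOf (' ' :: rest) = true := by simp [List.isPrefixOf]
        rw [if_pos hp]
        simp only [List.length_singleton, List.drop_one, List.tail_cons]
        rw [ih f [] (cur.reverse :: acc) (by omega)]
        simp [pvSplit]
      · have hp : [' '].isPrefixOf (c :: rest) = false := by
          simp [List.isPrefixOf]; exact fun h' => hc (h'.symm) |>.elim
        rw [if_neg (by simp [hp])]
        rw [ih f (c :: cur) acc (by omega)]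
        simp [pvSplit, hc]

theorem splitOn_eq (t : List Char) : PySem.Chars.splitOn t [' '] = pvSplit [] t := by
  rw [PySem.Chars.splitOn, pvSplit_go t (t.length + 1) [] [] (by omega)]
  simp

theorem pyRange_chunk_cons (L m : Int) (hm : 0 < m) (hL : 0 < L) :
    PySem.List.pyRange 0 L m = 0 :: (PySem.List.pyRange 0 (L - m) m).map (· + m) := by
  rw [PySem.List.pyRange_of_pos _ _ hm, PySem.List.pyRange_of_pos _ _ hm]
  by_cases h : m < L
  · have h1 : (0:Int) < L - m := by omega
    rw [if_pos hL, if_pos h1]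
    have hn : ((L - 0 + m - 1) / m).toNat = ((L - m - 0 + m - 1) / m).toNat + 1 := by
      have e : L - 0 + m - 1 = (L - m - 0 + m - 1) + 1 * m := by ring
      rw [e, Int.add_mul_ediv_right _ _ (by omega : m ≠ 0)]
      have h2 : 0 ≤ (L - m - 0 + m - 1) / m := Int.ediv_nonneg (by omega) (by omega)
      omega
    rw [hn, List.range_succ_eq_map]
    simp only [List.map_cons, List.map_map, Nat.cast_zero]
    congr 1
    · ring
    · apply List.map_congr_left
      intro k _
      simp only [Function.comp_apply]
      push_cast
      ring
  · rw [if_pos hL, if_neg (by omega)]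
    have hone : (L - 0 + m - 1) / m = 1 := by
      rw [← PySem.Int.floordiv_eq_ediv_of_pos (by omega)]
      rw [PySem.Int.floordiv_eq_iff_of_pos (by omega)]
      omega
    rw [hone]
    simp

theorem slice_shift (w : List Char) (m i : Int) (hm : 0 ≤ m) (hi : 0 ≤ i) :
    PySem.List.slice w (some (i + m)) (some (i + m + m))
      = PySem.List.slice (w.drop m.toNat) (some i) (some (i + m)) := by
  rw [PySem.List.slice_toNat _ (by omega) (by omega), PySem.List.slice_toNat _ hi (by omega)]
  rw [List.drop_drop]
  congr 1
  · omega
  · congr 1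
    omega

theorem pvJoin_cons (a : List Char) (l : List (List Char)) (hl : l ≠ []) :
    PySem.Chars.join [' '] (a :: l) = a ++ ' ' :: PySem.Chars.join [' '] l := by
  match l with
  | b :: r => rw [PySem.Chars.join_cons_cons]; simp

theorem join_chunks_aux (m : Int) (hm : 1 ≤ m) : ∀ (n : Nat) (w : List Char), w.length = n →
    PySem.Chars.join [' ']
      ((PySem.List.pyRange 0 (w.length : Int) m).map
        (fun i => PySem.List.slice w (some i) (some (i + m)))) = pvHW m w := by
  intro n
  induction n using Nat.strong_induction_on with
  | _ n ih =>
    intro w hw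
    by_cases h0 : w = []
    · subst h0
      rw [PySem.List.pyRange_of_pos _ _ (by omega)]
      rw [pvHW_le _ _ (by simp; omega)]
      simp
    · have hL : (0:Int) < w.length := by
        have := List.length_pos_iff.mpr h0; omega
      rw [pyRange_chunk_cons _ _ (by omega) hL, List.map_cons, List.map_map]
      have hhead : PySem.List.slice w (some 0) (some (0 + m)) = w.take m.toNat := by
        rw [PySem.List.slice_toNat _ le_rfl (by omega)]
        simp
      by_cases hle : (w.length : Int) ≤ m
      · have hnil : PySem.List.pyRange 0 ((w.length : Int) - m) m = [] := by
          rw [PySem.List.pyRange_of_pos _ _ (by omega : (0:Int) < m), if_neg (by omega)]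
          simp
        rw [hnil]
        simp only [List.map_nil]
        rw [PySem.Chars.join_singleton, hhead, pvHW_le _ _ (Or.inl hle)]
        exact List.take_of_length_le (by omega)
      · have hmle : m.toNat ≤ w.length := by omega
        have hlen : ((w.drop m.toNat).length : Int) = (w.length : Int) - m := by
          simp only [List.length_drop]; omega
        have htail : ((PySem.List.pyRange 0 ((w.length:Int) - m) m).map
            ((fun i => PySem.List.slice w (some i) (some (i + m))) ∘ (· + m)))
            = (PySem.List.pyRange 0 ((w.drop m.toNat).length : Int) m).map
                (fun i => PySem.List.slice (w.drop m.toNat) (some i) (some (i + m))) := by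
          rw [hlen]
          apply List.map_congr_left
          intro i hi
          have hi0 : 0 ≤ i := by
            have := (PySem.List.mem_pyRange_iff_of_pos (by omega : (0:Int) < m) i).mp hi
            omega
          simp only [Function.comp_apply]
          exact slice_shift w m i (by omega) hi0
        rw [htail]
        have hdl : (w.drop m.toNat).length < n := by
          simp only [List.length_drop]; omega
        have hdpos : (0:Int) < ((w.drop m.toNat).length : Int) := by rw [hlen]; omega
        have htne : (PySem.List.pyRange 0 ((w.drop m.toNat).length : Int) m).map
                (fun i => PySem.List.slice (w.drop m.toNat) (some i) (some (i + m))) ≠ [] := by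
          rw [pyRange_chunk_cons _ _ (by omega) hdpos]
          simp
        rw [pvJoin_cons _ _ htne, hhead, ih _ hdl (w.drop m.toNat) rfl]
        conv_rhs => rw [pvHW_gt _ _ (by omega)]

theorem join_g (m : Int) (hm : 1 ≤ m) (w : List Char) :
    PySem.Chars.join [' '] (pvG m w) = pvHW m w := by
  rw [pvG]
  by_cases hle : (w.length : Int) ≤ m
  · rw [if_pos hle, PySem.Chars.join_singleton, pvHW_le _ _ (Or.inl hle)]
  · rw [if_neg hle]
    exact join_chunks_aux m hm w.length w rfl

theorem pvG_ne_nil (m : Int) (hm : 1 ≤ m) (w : List Char) : pvG m w ≠ [] := by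
  rw [pvG]
  by_cases hle : (w.length : Int) ≤ m
  · simp [hle]
  · rw [if_neg hle, pyRange_chunk_cons _ _ (by omega) (by omega)]
    simp

theorem pvSplit_shape (s : List Char) : ∀ p, ∃ w ws, pvSplit p s = w :: ws := by
  induction s with
  | nil => intro p; exact ⟨p, [], rfl⟩
  | cons c rest ih =>
    intro p
    by_cases hc : c = ' '
    · exact ⟨p, pvSplit [] rest, by simp [pvSplit, hc]⟩
    · obtain ⟨w, ws, hw⟩ := ih (p ++ [c])
      exact ⟨w, ws, by simp [pvSplit, hc, hw]⟩

theorem flatMap_g_ne_nil (m : Int) (hm : 1 ≤ m) (p s : List Char) :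
    (pvSplit p s).flatMap (pvG m) ≠ [] := by
  obtain ⟨w, ws, hw⟩ := pvSplit_shape s p
  rw [hw, List.flatMap_cons]
  intro h
  exact pvG_ne_nil m hm w (List.append_eq_nil_iff.mp h).1

theorem pvJoin_append (xs ys : List (List Char)) (hx : xs ≠ []) (hy : ys ≠ []) :
    PySem.Chars.join [' '] (xs ++ ys)
      = PySem.Chars.join [' '] xs ++ ' ' :: PySem.Chars.join [' '] ys := by
  induction xs with
  | nil => exact absurd rfl hx
  | cons a l ih =>
    match l with
    | [] =>
      rw [List.cons_append, List.nil_append, pvJoin_cons _ _ hy, PySem.Chars.join_singleton]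
    | b :: r =>
      have ih' := ih (by simp)
      simp only [List.cons_append] at ih'
      simp only [List.cons_append]
      rw [PySem.Chars.join_cons_cons, ih', PySem.Chars.join_cons_cons]
      simp

theorem pv_snoc (m : Int) (hm : 1 ≤ m) : ∀ (n : Nat) (p : List Char), p.length = n → ∀ c : Char,
    pvHW m (p ++ [c]) = pvHW m p ++ (if pvRN m p = m.toNat then [' ', c] else [c])
    ∧ pvRN m (p ++ [c]) = (if pvRN m p = m.toNat then 1 else pvRN m p + 1) := by
  intro n
  induction n using Nat.strong_induction_on with
  | _ n ih =>
    intro p hp c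
    by_cases h1 : (p.length : Int) < m
    · have rnp : pvRN m p = p.length := pvRN_le _ _ (Or.inl (by omega))
      have hne : pvRN m p ≠ m.toNat := by omega
      rw [if_neg hne, if_neg hne]
      constructor
      · rw [pvHW_le _ _ (Or.inl (by simp; omega)), pvHW_le _ _ (Or.inl (by omega))]
      · rw [pvRN_le _ _ (Or.inl (by simp; omega)), rnp]
        simp
    · by_cases h2 : (p.length : Int) = m
      · have rnp : pvRN m p = p.length := pvRN_le _ _ (Or.inl (by omega))
        have heq : pvRN m p = m.toNat := by omega
        rw [if_pos heq, if_pos heq]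
        have hgt : ¬(((p ++ [c]).length : Int) ≤ m ∨ m < 1) := by simp; omega
        have htk : (p ++ [c]).take m.toNat = p := by
          have : m.toNat = p.length := by omega
          rw [this]
          exact List.take_left
        have hdr : (p ++ [c]).drop m.toNat = [c] := by
          have : m.toNat = p.length := by omega
          rw [this]
          exact List.drop_left
        constructor
        · rw [pvHW_gt _ _ hgt, htk, hdr, pvHW_le _ _ (Or.inl (by simp; omega)),
            pvHW_le _ _ (Or.inl (by omega))]
        · rw [pvRN_gt _ _ hgt, hdr, pvRN_le _ _ (Or.inl (by simp; omega))]
          simp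
      · have hgtp : ¬(((p.length : Int)) ≤ m ∨ m < 1) := by omega
        have hgt : ¬(((p ++ [c]).length : Int) ≤ m ∨ m < 1) := by simp; omega
        have hmle : m.toNat ≤ p.length := by omega
        have htk : (p ++ [c]).take m.toNat = p.take m.toNat :=
          List.take_append_of_le_length hmle
        have hdr : (p ++ [c]).drop m.toNat = p.drop m.toNat ++ [c] :=
          List.drop_append_of_le_length hmle
        have hdl : (p.drop m.toNat).length < n := by
          simp only [List.length_drop]; omega
        obtain ⟨ih1, ih2⟩ := ih _ hdl (p.drop m.toNat) rfl c
        have rnp : pvRN m p = pvRN m (p.drop m.toNat) := pvRN_gt _ _ hgtp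
        constructor
        · rw [pvHW_gt _ _ hgt, htk, hdr, ih1, pvHW_gt _ _ hgtp, rnp]
          split <;> simp
        · rw [pvRN_gt _ _ hgt, hdr, ih2, rnp]

theorem pvMain (m : Int) (hm : 1 ≤ m) : ∀ (s p acc : List Char),
    (s.foldl (pvStep m) (acc ++ pvHW m p, (pvRN m p : Int))).1
      = acc ++ PySem.Chars.join [' '] ((pvSplit p s).flatMap (pvG m)) := by
  intro s
  induction s with
  | nil =>
    intro p acc
    simp only [List.foldl_nil, pvSplit, List.flatMap_cons, List.flatMap_nil, List.append_nil]
    rw [join_g m hm]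
  | cons ch rest ih =>
    intro p acc
    by_cases hc : ch = ' '
    · subst hc
      rw [List.foldl_cons]
      have hstep : pvStep m (acc ++ pvHW m p, (pvRN m p : Int)) ' '
          = ((acc ++ pvHW m p ++ [' ']) ++ pvHW m [], ((pvRN m [] : Nat) : Int)) := by
        rw [pvStep, if_pos (by simp), pvHW_le _ [] (Or.inl (by simp; omega)),
          pvRN_le _ [] (Or.inl (by simp; omega))]
        simp
      rw [hstep, ih [] (acc ++ pvHW m p ++ [' '])]
      have hsplit : pvSplit p (' ' :: rest) = p :: pvSplit [] rest := by simp [pvSplit]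
      rw [hsplit, List.flatMap_cons,
        pvJoin_append _ _ (pvG_ne_nil m hm p) (flatMap_g_ne_nil m hm [] rest), join_g m hm]
      simp
    · rw [List.foldl_cons]
      obtain ⟨hsn1, hsn2⟩ := pv_snoc m hm p.length p rfl ch
      have hstep : pvStep m (acc ++ pvHW m p, (pvRN m p : Int)) ch
          = (acc ++ pvHW m (p ++ [ch]), ((pvRN m (p ++ [ch]) : Nat) : Int)) := by
        rw [pvStep, if_neg (by simp [hc])]
        by_cases hr : pvRN m p = m.toNat
        · rw [if_pos (by simp [hr]; omega), hsn1, hsn2, if_pos hr, if_pos hr]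
          simp
        · have : ¬((pvRN m p : Int) == m) = true := by
            simp only [beq_iff_eq]
            intro hrr
            exact hr (by omega)
          rw [if_neg this, hsn1, hsn2, if_neg hr, if_neg hr]
          simp
      rw [hstep, ih (p ++ [ch]) acc]
      have hsplit : pvSplit p (ch :: rest) = pvSplit (p ++ [ch]) rest := by simp [pvSplit, hc]
      rw [hsplit]

theorem foldl_wrap_eq_flatMap (m : Int) (ws : List (List Char)) :
    ws.foldl (fun acc w =>
      if (w.length : Int) ≤ m then acc ++ [w]
      else acc ++ (PySem.List.pyRange 0 (w.length : Int) m).map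
            (fun i => PySem.List.slice w (some i) (some (i + m)))) []
      = ws.flatMap (pvG m) := by
  have hf : (fun (acc : List (List Char)) (w : List Char) =>
      if (w.length : Int) ≤ m then acc ++ [w]
      else acc ++ (PySem.List.pyRange 0 (w.length : Int) m).map
            (fun i => PySem.List.slice w (some i) (some (i + m))))
      = fun acc w => acc ++ pvG m w := by
    funext acc w
    by_cases h : (w.length : Int) ≤ m <;> simp [pvG, h]
  rw [hf, PySem.List.foldl_append_eq_flatMap]
  simp

-- ===== VERDICT =====
theorem safe_wrap_long_tokens_spec : Claim_equal_safe_wrap_long_tokens := by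
  intro text m hDom hPre
  have hm : 1 ≤ m := hPre
  unfold Spec_safe_wrap_long_tokens
  by_cases ht : text = ""
  · subst ht
    rw [safe_wrap_long_tokens, if_pos rfl, safe_wrap_long_tokens_alt]
    rfl
  · rw [safe_wrap_long_tokens, if_neg ht, safe_wrap_long_tokens_alt]
    apply congrArg String.mk
    rw [splitOn_eq, foldl_wrap_eq_flatMap]
    have hmain := pvMain m hm (pvSanitize text) [] []
    rw [pvHW_le _ [] (Or.inl (by simp; omega)), pvRN_le _ [] (Or.inl (by simp; omega))] at hmain
    simp only [List.append_nil, List.nil_append, List.length_nil, Nat.cast_zero] at hmain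
    exact hmain.symm
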